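-- pv_equiv track=rewrite | github.com/KonstantinS007/PythonProject | Practika15/practika15_1.py | most_Length
-- ===== SOURCE A (Python) =====
-- def most_Length(text):
--     """
--     Функция принимает список.
--     Возвращает самый длинный элемент.
--     Если есть несколько элементов с одинаковой самой большой длиной, то вернёт их все.
--     """
--
--     most_length = []
--     qty_most_length = 0
--     alphabet = r'abcdefghijklmnopqrstuvwxyz`ABCDEFGHIJKLMNOPQRSTUVWXYZ'
--     for item in text:
--         for char in item:
--             if char not in alphabet:
--                 charEn = False
--             else:
--                 charEn = True
--
--             if charEn:
--                 qty = len(item)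
--                 if qty > qty_most_length:
--                     qty_most_length = qty
--                     most_length = [item]
--                 elif qty == qty_most_length:
--                     most_length.append(item)
--
--     return list(set(most_length))
-- ===== SOURCE B (Python) =====
-- def most_Length(text):
--     """
--     Функция принимает список.
--     Возвращает самый длинный элемент.
--     Если есть несколько элементов с одинаковой самой большой длиной, то вернёт их все.
--     """
--     alphabet = r'abcdefghijklmnopqrstuvwxyz`ABCDEFGHIJKLMNOPQRSTUVWXYZ'
--     qualifying = [item for item in text if any(char in alphabet for char in item)]
--     if not qualifying:
--         return []
--     m = max(len(item) for item in qualifying)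
--     return list(set(item for item in qualifying if len(item) == m))
-- ===== Notes on version B (the rewrite author's own statement) =====
-- stated objective: simpler
-- what changed: Replaces A's single intertwined per-character running-max scan (which mutates a best-list and max inside the inner char loop) with three separated whole-list passes: filter the items containing an alphabet character, take the max length among them, filter by that length.
import Mathlib
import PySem

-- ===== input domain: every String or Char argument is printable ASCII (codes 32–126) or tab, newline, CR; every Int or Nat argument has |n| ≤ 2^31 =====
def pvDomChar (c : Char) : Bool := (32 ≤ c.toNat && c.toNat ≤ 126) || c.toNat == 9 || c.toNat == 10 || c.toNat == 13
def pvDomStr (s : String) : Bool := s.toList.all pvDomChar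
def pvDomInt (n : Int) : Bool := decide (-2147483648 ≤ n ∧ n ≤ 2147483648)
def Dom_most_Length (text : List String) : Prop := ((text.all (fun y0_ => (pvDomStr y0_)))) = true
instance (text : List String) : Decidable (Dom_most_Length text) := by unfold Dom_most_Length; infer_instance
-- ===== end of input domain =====

-- B replaces A's intertwined per-character running-max scan with three separated passes (filter qualifying items, max length, filter by it); objective: simpler.
-- ===== PORT A =====
-- Port of A: one intertwined running-max scan over each character, finished by list(set(...)).
def pvAlpha : List Char := "abcdefghijklmnopqrstuvwxyz`ABCDEFGHIJKLMNOPQRSTUVWXYZ".toList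

def pvLen (s : String) : Nat := s.toList.length  -- len(item)

def most_Length (text : List String) : List String :=
  let st := text.foldl (fun st item =>
    item.toList.foldl (fun st char =>
      let charEn := if pvAlpha.contains char then true else false
      if charEn then
        let qty := pvLen item
        if qty > st.2 then ([item], qty)
        else if qty = st.2 then (st.1 ++ [item], st.2)
        else st
      else st) st) (([] : List String), (0 : Nat))
  PySem.Set.ofList st.1

-- ===== PORT B =====
-- Port of B: three separated passes — filter the qualifying items, take the max length, filter by it.
def pvHasLetter (item : String) : Bool := item.toList.any (fun char => pvAlpha.contains char)

def most_Length_alt (text : List String) : List String :=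
  let qualifying := text.filter pvHasLetter
  if qualifying = [] then []
  else
    let m := qualifying.foldl (fun m item => max m (pvLen item)) 0
    PySem.Set.ofList (qualifying.filter (fun item => pvLen item = m))

-- ===== PRECONDITION & SPEC =====
def Spec_most_Length (text : List String) (out : List String) : Prop := out = most_Length_alt text
instance (text : List String) (out : List String) : Decidable (Spec_most_Length text out) := by unfold Spec_most_Length; infer_instance

-- ===== CLAIM (what is proved, stated in full; the proofs are below) =====
def Claim_equal_most_Length : Prop := ∀ (text : List String), Dom_most_Length text → Spec_most_Length text (most_Length text)

-- ===== LEMMAS AND PROOFS =====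

-- names for A's two folds
def aChar (item : String) (st : List String × Nat) (char : Char) : List String × Nat :=
  let charEn := if pvAlpha.contains char then true else false
  if charEn then
    let qty := pvLen item
    if qty > st.2 then ([item], qty)
    else if qty = st.2 then (st.1 ++ [item], st.2)
    else st
  else st

def aItem (st : List String × Nat) (item : String) : List String × Nat :=
  item.toList.foldl (aChar item) st

-- one abstract step per item
def absStep (st : List String × Nat) (item : String) : List String × Nat :=
  if pvHasLetter item then
    if pvLen item > st.2 then ([item], pvLen item)
    else if pvLen item = st.2 then (st.1 ++ [item], st.2)
    else st
  else st

-- the relation preserved between A's fold and the abstract fold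
def Rst (st st' : List String × Nat) : Prop :=
  st.2 = st'.2 ∧ PySem.Set.ofList st.1 = PySem.Set.ofList st'.1

theorem aChar_eq (item : String) (st : List String × Nat) (c : Char) :
    aChar item st c =
      if pvAlpha.contains c then
        (if pvLen item > st.2 then ([item], pvLen item)
         else if pvLen item = st.2 then (st.1 ++ [item], st.2)
         else st)
      else st := by
  unfold aChar
  have h : (if pvAlpha.contains c then true else false) = pvAlpha.contains c := by
    cases pvAlpha.contains c <;> rfl
  rw [h]

theorem most_Length_eq_fold (text : List String) :
    most_Length text = PySem.Set.ofList (text.foldl aItem ([], 0)).1 := rfl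

-- ofList is a congruence for appending one element
theorem ofList_append_congr {L L' : List String} (x : String)
    (h : PySem.Set.ofList L = PySem.Set.ofList L') :
    PySem.Set.ofList (L ++ [x]) = PySem.Set.ofList (L' ++ [x]) := by
  rw [PySem.Set.ofList_append_singleton, PySem.Set.ofList_append_singleton, h]

theorem Rst_refl (st : List String × Nat) : Rst st st := ⟨rfl, rfl⟩

theorem Rst_trans {a b c : List String × Nat} (h1 : Rst a b) (h2 : Rst b c) : Rst a c :=
  ⟨h1.1.trans h2.1, h1.2.trans h2.2⟩

theorem absStep_resp {st st' : List String × Nat} (item : String) (h : Rst st st') :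
    Rst (absStep st item) (absStep st' item) := by
  obtain ⟨h2, h1⟩ := h
  unfold absStep
  rw [h2]
  split_ifs with hq hg he
  · exact Rst_refl _
  · exact ⟨rfl, ofList_append_congr item h1⟩
  · exact ⟨h2, h1⟩
  · exact ⟨h2, h1⟩

-- after the state already dominates the item, further letter chars change nothing up to Rst
theorem inner_stable (item : String) (chars : List Char) :
    ∀ st : List String × Nat, pvLen item ≤ st.2 → item ∈ st.1 →
      Rst (chars.foldl (aChar item) st) st := by
  induction chars with
  | nil => intro st _ _; exact Rst_refl st
  | cons c cs ih =>
    intro st hle hmem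
    rw [List.foldl_cons, aChar_eq]
    split_ifs with hc hg he
    · omega
    · refine Rst_trans (ih _ (by exact he.le) (by simp)) ?_
      refine ⟨rfl, ?_⟩
      rw [PySem.Set.ofList_append_singleton]
      exact PySem.Set.add_of_mem (by simpa [PySem.Set.mem_ofList] using hmem)
    · exact ih st hle hmem
    · exact ih st hle hmem

-- if the item is strictly shorter, the inner fold does nothing at all
theorem inner_short (item : String) (chars : List Char) :
    ∀ st : List String × Nat, pvLen item < st.2 →
      chars.foldl (aChar item) st = st := by
  induction chars with
  | nil => intro st _; rfl
  | cons c cs ih =>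
    intro st hlt
    rw [List.foldl_cons, aChar_eq]
    split_ifs with hc hg he
    · omega
    · omega
    · exact ih st hlt
    · exact ih st hlt

-- the inner char-fold equals the single abstract step, up to Rst
theorem inner_eq_absStep (item : String) :
    ∀ (chars : List Char) (st : List String × Nat),
      (chars.any (fun c => pvAlpha.contains c)) = pvHasLetter item →
      Rst (chars.foldl (aChar item) st) (absStep st item) := by
  intro chars
  induction chars with
  | nil =>
    intro st hany
    have hq : pvHasLetter item = false := by rw [← hany]; rfl
    unfold absStep
    rw [hq]
    exact Rst_refl st
  | cons c cs ih =>
    intro st hany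
    rw [List.foldl_cons, aChar_eq]
    by_cases hc : pvAlpha.contains c
    · have hq : pvHasLetter item = true := by
        rw [← hany, List.any_cons, hc, Bool.true_or]
      rw [if_pos hc]
      unfold absStep
      rw [hq, if_pos rfl]
      split_ifs with hg he
      · exact inner_stable item cs _ (le_refl _) (by simp)
      · exact inner_stable item cs _ (by omega) (by simp)
      · rw [inner_short item cs st (by omega)]; exact Rst_refl st
    · rw [if_neg hc]
      refine ih st ?_
      have hcf : pvAlpha.contains c = false := Bool.eq_false_iff.mpr hc
      rw [← hany, List.any_cons, hcf, Bool.false_or]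

theorem outer_R (text : List String) :
    ∀ st st' : List String × Nat, Rst st st' →
      Rst (text.foldl aItem st) (text.foldl absStep st') := by
  induction text with
  | nil => intro st st' h; exact h
  | cons item rest ih =>
    intro st st' h
    rw [List.foldl_cons, List.foldl_cons]
    exact ih _ _ (Rst_trans (inner_eq_absStep item item.toList st rfl) (absStep_resp item h))

theorem absStep_neg (st : List String × Nat) (item : String) (hq : pvHasLetter item = false) :
    absStep st item = st := by
  unfold absStep; rw [hq]; rfl

theorem absStep_gt (st : List String × Nat) (item : String) (hq : pvHasLetter item = true)
    (hg : pvLen item > st.2) : absStep st item = ([item], pvLen item) := by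
  unfold absStep; rw [hq, if_pos rfl, if_pos hg]

theorem absStep_eq (st : List String × Nat) (item : String) (hq : pvHasLetter item = true)
    (he : pvLen item = st.2) : absStep st item = (st.1 ++ [item], st.2) := by
  unfold absStep; rw [hq, if_pos rfl, if_neg (by omega), if_pos he]

theorem absStep_lt (st : List String × Nat) (item : String) (hq : pvHasLetter item = true)
    (hl : pvLen item < st.2) : absStep st item = st := by
  unfold absStep; rw [hq, if_pos rfl, if_neg (by omega), if_neg (by omega)]

-- characterization: the abstract fold computes exactly B's three passes
theorem abs_main (text : List String) :
    (text.foldl absStep ([], 0)).2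
      = (text.filter pvHasLetter).foldl (fun m item => max m (pvLen item)) 0 ∧
    PySem.Set.ofList (text.foldl absStep ([], 0)).1
      = PySem.Set.ofList ((text.filter pvHasLetter).filter
          (fun s => pvLen s = (text.foldl absStep ([], 0)).2)) ∧
    (∀ s ∈ text.filter pvHasLetter, pvLen s ≤ (text.foldl absStep ([], 0)).2) := by
  induction text using List.reverseRecOn with
  | nil => exact ⟨rfl, rfl, by intro s hs; cases hs⟩
  | append_singleton p item ih =>
    obtain ⟨ihM, ihL, ihB⟩ := ih
    rw [List.foldl_append, List.filter_append]
    simp only [List.foldl_cons, List.foldl_nil]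
    by_cases hq : pvHasLetter item
    · simp only [List.filter_cons, hq, if_true, List.filter_nil]
      rcases Nat.lt_trichotomy (p.foldl absStep ([], 0)).2 (pvLen item) with hg | he | hl
      · simp only [absStep_gt _ _ hq hg]
        refine ⟨by rw [List.foldl_append, List.foldl_cons, List.foldl_nil, ← ihM]; omega, ?_, ?_⟩
        · have hnone : (p.filter pvHasLetter).filter
              (fun s => decide (pvLen s = pvLen item)) = [] := by
            rw [List.filter_eq_nil_iff]
            intro s hs
            have := ihB s hs
            simp only [decide_eq_true_eq]
            omega
          rw [List.filter_append, hnone]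
          simp
        · intro s hs
          rcases List.mem_append.mp hs with h | h
          · exact le_trans (ihB s h) (by omega)
          · rw [List.mem_singleton] at h; subst h; rfl
      · simp only [absStep_eq _ _ hq he.symm]
        refine ⟨by rw [List.foldl_append, List.foldl_cons, List.foldl_nil, ← ihM]; omega, ?_, ?_⟩
        · rw [List.filter_append]
          simp only [List.filter_cons, decide_eq_true_eq, he.symm, if_true, List.filter_nil]
          exact ofList_append_congr item ihL
        · intro s hs
          rcases List.mem_append.mp hs with h | h
          · exact ihB s h
          · rw [List.mem_singleton] at h; subst h; omega
      · simp only [absStep_lt _ _ hq hl]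
        refine ⟨by rw [List.foldl_append, List.foldl_cons, List.foldl_nil, ← ihM]; omega, ?_, ?_⟩
        · rw [List.filter_append]
          have hno : ([item].filter (fun s => decide (pvLen s = (p.foldl absStep ([], 0)).2))) = [] := by
            simp only [List.filter_cons, decide_eq_true_eq, List.filter_nil]
            rw [if_neg (by omega)]
          rw [hno, List.append_nil]
          exact ihL
        · intro s hs
          rcases List.mem_append.mp hs with h | h
          · exact ihB s h
          · rw [List.mem_singleton] at h; subst h; omega
    · simp only [List.filter_cons, hq, Bool.false_eq_true, if_false, List.filter_nil, List.append_nil]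
      simp only [absStep_neg _ _ (Bool.eq_false_iff.mpr hq)]
      exact ⟨ihM, ihL, ihB⟩

-- ===== VERDICT (by name: the statement is the Claim_ definition above) =====
theorem most_Length_spec : Claim_equal_most_Length := by
  intro text _
  unfold Spec_most_Length most_Length_alt
  rw [most_Length_eq_fold]
  obtain ⟨hM, hL⟩ := outer_R text ([], 0) ([], 0) (Rst_refl _)
  obtain ⟨haM, haL, _⟩ := abs_main text
  by_cases hqp : text.filter pvHasLetter = []
  · rw [if_pos hqp, hL, haL, hqp]
    rfl
  · rw [if_neg hqp, hL, haL, haM]
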